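-- pv_equiv track=rewrite | github.com/lordrubenbp/navi-assistant-server | dr_appinventor/appInstructor.py | draw_blocks
-- ===== SOURCE A (Python) =====
-- def draw_blocks(components):
--     score = 0
--     for item in components:
--         if item['type'] == "Canvas":
--             if score < 1:
--                 score = 1
--         elif item['type'] == "Ball":
--             if score < 2:
--                 score = 2
--         elif item['type'] == "ImageSprite":
--             if score < 3:
--                 score = 3
--     return score
-- ===== SOURCE B (Python) =====
-- def draw_blocks(components):
--     types = {item['type'] for item in components}
--     if "ImageSprite" in types:
--         return 3
--     if "Ball" in types:
--         return 2
--     if "Canvas" in types: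
--         return 1
--     return 0
-- ===== Notes on version B (the rewrite author's own statement) =====
-- stated objective: simpler
-- what changed: Two-phase: first collect the set of component types, then an early-return priority chain of three membership tests (ImageSprite, Ball, Canvas), replacing A's single pass with a running-maximum accumulator.
import Mathlib
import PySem

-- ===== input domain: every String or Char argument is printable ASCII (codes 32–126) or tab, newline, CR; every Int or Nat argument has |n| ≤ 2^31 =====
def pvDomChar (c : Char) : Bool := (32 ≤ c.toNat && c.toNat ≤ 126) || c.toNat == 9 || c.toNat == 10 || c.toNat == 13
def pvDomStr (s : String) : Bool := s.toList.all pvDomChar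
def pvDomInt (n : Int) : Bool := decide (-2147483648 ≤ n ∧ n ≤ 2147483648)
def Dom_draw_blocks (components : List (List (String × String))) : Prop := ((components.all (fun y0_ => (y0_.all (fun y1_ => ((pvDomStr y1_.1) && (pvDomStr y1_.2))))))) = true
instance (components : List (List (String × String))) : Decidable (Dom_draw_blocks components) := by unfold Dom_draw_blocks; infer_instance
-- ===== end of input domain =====

-- B is two-phase: collect the set of component types, then an early-return priority chain of membership tests (objective: simpler).

-- ===== PORT A =====
def draw_blocks (components : List (List (String × String))) : Int :=
  components.foldl (fun score item =>
    if item.lookup "type" == some "Canvas" then (if score < 1 then 1 else score)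
    else if item.lookup "type" == some "Ball" then (if score < 2 then 2 else score)
    else if item.lookup "type" == some "ImageSprite" then (if score < 3 then 3 else score)
    else score) 0

-- ===== PORT B =====
def draw_blocks_alt (components : List (List (String × String))) : Int :=
  let types : PySem.Set String :=
    PySem.Set.ofList (components.map (fun item => (item.lookup "type").getD ""))
  if PySem.Set.contains types "ImageSprite" then 3
  else if PySem.Set.contains types "Ball" then 2
  else if PySem.Set.contains types "Canvas" then 1
  else 0

-- ===== PRECONDITION & SPEC =====
-- Pre_ excludes components containing an item without a "type" key, on which A raises KeyError.
def Pre_draw_blocks (components : List (List (String × String))) : Prop :=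
  (components.all (fun item => (item.lookup "type").isSome)) = true
instance (components : List (List (String × String))) : Decidable (Pre_draw_blocks components) := by
  unfold Pre_draw_blocks; infer_instance

def pvWitness_draw_blocks : (List (List (String × String))) :=
  [[("type", "Ball")], [("type", "Oven")], [("type", "Canvas")]]

def Spec_draw_blocks (components : List (List (String × String))) (out : Int) : Prop := out = draw_blocks_alt components
instance (components : List (List (String × String))) (out : Int) : Decidable (Spec_draw_blocks components out) := by unfold Spec_draw_blocks; infer_instance

-- ===== CLAIM =====
def Claim_equal_draw_blocks : Prop := ∀ (components : List (List (String × String))), Dom_draw_blocks components → Pre_draw_blocks components → Spec_draw_blocks components (draw_blocks components)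

-- ===== LEMMAS AND PROOFS =====

-- the type string B collects for an item
def pvT (item : List (String × String)) : String := (item.lookup "type").getD ""

-- B's if-chain, phrased on the list of items via any
def pvStaged (l : List (List (String × String))) : Int :=
  if l.any (fun it => pvT it == "ImageSprite") then 3
  else if l.any (fun it => pvT it == "Ball") then 2
  else if l.any (fun it => pvT it == "Canvas") then 1
  else 0

-- the score A assigns one item
def pvF (item : List (String × String)) : Int :=
  if pvT item = "Canvas" then 1 else if pvT item = "Ball" then 2
  else if pvT item = "ImageSprite" then 3 else 0

lemma pvStep_eq_max (s : Int) (item : List (String × String))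
    (hk : (item.lookup "type").isSome) (hs : 0 ≤ s) :
    (if item.lookup "type" == some "Canvas" then (if s < 1 then 1 else s)
     else if item.lookup "type" == some "Ball" then (if s < 2 then 2 else s)
     else if item.lookup "type" == some "ImageSprite" then (if s < 3 then 3 else s)
     else s) = max s (pvF item) := by
  obtain ⟨t, ht⟩ := Option.isSome_iff_exists.mp hk
  simp only [pvF, pvT, ht, Option.getD_some, Option.some_beq_some, beq_iff_eq]
  by_cases h1 : t = "Canvas" <;> by_cases h2 : t = "Ball" <;> by_cases h3 : t = "ImageSprite" <;>
    simp_all <;> omega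

lemma pvStaged_cons (hd : List (String × String)) (tl : List (List (String × String))) :
    pvStaged (hd :: tl) = max (pvF hd) (pvStaged tl) := by
  simp only [pvStaged, pvF, List.any_cons, Bool.or_eq_true, beq_iff_eq]
  by_cases h1 : pvT hd = "Canvas" <;> by_cases h2 : pvT hd = "Ball" <;>
    by_cases h3 : pvT hd = "ImageSprite" <;> simp_all <;> split_ifs <;> omega

lemma pvStaged_nonneg (l : List (List (String × String))) : 0 ≤ pvStaged l := by
  unfold pvStaged; split_ifs <;> omega

lemma pvFold_eq (l : List (List (String × String))) :
    ∀ s : Int, 0 ≤ s →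
    (l.all (fun item => (item.lookup "type").isSome)) = true →
    l.foldl (fun score item =>
      if item.lookup "type" == some "Canvas" then (if score < 1 then 1 else score)
      else if item.lookup "type" == some "Ball" then (if score < 2 then 2 else score)
      else if item.lookup "type" == some "ImageSprite" then (if score < 3 then 3 else score)
      else score) s = max s (pvStaged l) := by
  induction l with
  | nil => intro s hs _; simp [pvStaged]; omega
  | cons hd tl ih =>
    intro s hs hall
    simp only [List.all_cons, Bool.and_eq_true] at hall
    simp only [List.foldl_cons]
    rw [pvStep_eq_max s hd hall.1 hs,
        ih _ (le_trans hs (le_max_left _ _)) hall.2, pvStaged_cons]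
    omega

lemma pvAlt_eq_staged (l : List (List (String × String))) :
    draw_blocks_alt l = pvStaged l := by
  unfold draw_blocks_alt pvStaged
  have hmem : ∀ t : String,
      PySem.Set.contains (PySem.Set.ofList (l.map (fun item => (item.lookup "type").getD ""))) t
        = l.any (fun it => pvT it == t) := by
    intro t
    rcases h : l.any (fun it => pvT it == t) with _ | _
    · simp only [List.any_eq_false, beq_iff_eq] at h
      rw [Bool.eq_false_iff]
      intro hc
      rw [PySem.Set.contains_iff, PySem.Set.mem_ofList, List.mem_map] at hc
      obtain ⟨it, hit, hft⟩ := hc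
      exact h it hit (by simpa [pvT] using hft)
    · simp only [List.any_eq_true, beq_iff_eq] at h
      obtain ⟨it, hit, hft⟩ := h
      rw [PySem.Set.contains_iff, PySem.Set.mem_ofList, List.mem_map]
      exact ⟨it, hit, by simpa [pvT] using hft⟩
  simp only [hmem]

-- ===== VERDICT =====
theorem draw_blocks_spec : Claim_equal_draw_blocks := by
  intro components _ hpre
  unfold Spec_draw_blocks draw_blocks
  rw [pvFold_eq components 0 le_rfl hpre, pvAlt_eq_staged]
  have := pvStaged_nonneg components
  omega
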